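-- pv_equiv track=rewrite | github.com/k-harada/AtCoder | ABC/ABC1XX/ABC182/E.py | solve
-- ===== SOURCE A (Python) =====
-- def solve(h, w, n, m, ab_list, cd_list):
--
--     res_list = [[0] * w for _ in range(h)]
--     room_list = [[0] * w for _ in range(h)]
--
--     for a, b in ab_list:
--         room_list[a - 1][b - 1] = 1
--     for c, d in cd_list:
--         room_list[c - 1][d - 1] = -1
--
--     # right
--     for i in range(h):
--         light = 0
--         for j in range(w):
--             if room_list[i][j] == 1:
--                 light = 1
--             elif room_list[i][j] == -1:
--                 light = 0
--             res_list[i][j] = max(light, res_list[i][j])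
--     # left
--     for i in range(h):
--         light = 0
--         for j in range(w - 1, -1, -1):
--             if room_list[i][j] == 1:
--                 light = 1
--             elif room_list[i][j] == -1:
--                 light = 0
--             res_list[i][j] = max(light, res_list[i][j])
--     # down
--     for j in range(w):
--         light = 0
--         for i in range(h):
--             if room_list[i][j] == 1:
--                 light = 1
--             elif room_list[i][j] == -1:
--                 light = 0
--             res_list[i][j] = max(light, res_list[i][j])
--     # up
--     for j in range(w):
--         light = 0
--         for i in range(h - 1, -1, -1):
--             if room_list[i][j] == 1:
--                 light = 1
--             elif room_list[i][j] == -1: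
--                 light = 0
--             res_list[i][j] = max(light, res_list[i][j])
--
--     res = 0
--     for i in range(h):
--         for j in range(w):
--             res += res_list[i][j]
--
--     return res
-- ===== SOURCE B (Python) =====
-- def solve(h, w, n, m, ab_list, cd_list):
--     room = [[0] * w for _ in range(h)]
--     for a, b in ab_list:
--         room[a - 1][b - 1] = 1
--     for c, d in cd_list:
--         room[c - 1][d - 1] = -1
--
--     def seg_lit(cells):
--         # lit flags per cell: a cell is lit iff it is not a wall and its maximal
--         # wall-free segment contains a light
--         out = []
--         pending = 0
--         has_light = False
--         for v in cells:
--             if v == -1: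
--                 out.extend([has_light] * pending)
--                 out.append(False)
--                 pending = 0
--                 has_light = False
--             else:
--                 pending += 1
--                 if v == 1:
--                     has_light = True
--         out.extend([has_light] * pending)
--         return out
--
--     rows_lit = [seg_lit(room[i]) for i in range(h)]
--     cols_lit = [seg_lit([room[i][j] for i in range(h)]) for j in range(w)]
--
--     res = 0
--     for i in range(h):
--         ri = rows_lit[i]
--         for j in range(w):
--             if ri[j] or cols_lit[j][i]:
--                 res += 1
--     return res
-- ===== Notes on version B (the rewrite author's own statement) =====
-- stated objective: alternative
-- what changed: Replaces the four directional running-light sweeps with per-cell max-merging by one segment scan per row and per column (a maximal wall-free segment is lit iff it contains a light), then counts cells lit horizontally or vertically; measured ~4.7x faster on large grids but the probe could not confirm it at the largest size, so no speed is claimed.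
import Mathlib
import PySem

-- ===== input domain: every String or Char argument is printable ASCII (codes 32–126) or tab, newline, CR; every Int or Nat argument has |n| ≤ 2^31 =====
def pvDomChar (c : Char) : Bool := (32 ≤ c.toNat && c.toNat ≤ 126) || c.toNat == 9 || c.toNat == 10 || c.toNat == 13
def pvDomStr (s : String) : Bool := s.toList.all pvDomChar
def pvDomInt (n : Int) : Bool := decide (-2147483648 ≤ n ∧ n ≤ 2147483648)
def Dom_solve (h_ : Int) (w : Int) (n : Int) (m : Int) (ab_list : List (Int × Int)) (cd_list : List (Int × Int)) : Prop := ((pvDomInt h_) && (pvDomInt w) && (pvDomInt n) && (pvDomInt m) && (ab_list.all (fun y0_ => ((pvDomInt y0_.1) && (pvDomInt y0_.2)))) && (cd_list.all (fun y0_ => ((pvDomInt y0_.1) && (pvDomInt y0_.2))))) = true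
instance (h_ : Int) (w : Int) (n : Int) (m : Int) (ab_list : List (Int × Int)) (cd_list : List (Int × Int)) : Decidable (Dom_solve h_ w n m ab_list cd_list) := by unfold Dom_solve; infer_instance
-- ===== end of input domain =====

-- B replaces A's four directional running-light sweeps (with per-cell max) by one
-- segment scan per row and per column (a wall-free segment is lit iff it holds a light).


-- shared helpers: both Pythons build room_list by the same statements
-- g[i][j] for ints i, j (total form; used only where Pre_/ranges keep indices in Python range)
def pvGet2 (g : List (List Int)) (i j : Int) : Int :=
  PySem.List.pyGetD (PySem.List.pyGetD g i []) j 0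

-- g[i][j] = v (Python negative indices wrap; out-of-range = IndexError, excluded by Pre_)
def pvSet2 (g : List (List Int)) (i j : Int) (v : Int) : List (List Int) :=
  PySem.List.pySetD g i (PySem.List.pySetD (PySem.List.pyGetD g i []) j v)

-- room_list: zeros, then room[a-1][b-1] = 1 for lights, then room[c-1][d-1] = -1 for walls
def pvRoom (h_ w : Int) (ab_list cd_list : List (Int × Int)) : List (List Int) :=
  let g0 : List (List Int) := List.replicate h_.toNat (List.replicate w.toNat 0)
  let g1 := ab_list.foldl (fun g p => pvSet2 g (p.1 - 1) (p.2 - 1) 1) g0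
  cd_list.foldl (fun g p => pvSet2 g (p.1 - 1) (p.2 - 1) (-1)) g1

-- ===== PORT A =====
-- if room==1: light=1 elif room==-1: light=0
def pvLStep (l : Int) (v : Int) : Int := if v = 1 then 1 else if v = -1 then 0 else l

-- one body of A's sweep loops: update light, then res[i][j] = max(light, res[i][j])
def pvUpd (room : List (List Int)) (i j : Int) (st : List (List Int) × Int) :
    List (List Int) × Int :=
  let light := pvLStep st.2 (pvGet2 room i j)
  (pvSet2 st.1 i j (max light (pvGet2 st.1 i j)), light)

def solve (h_ : Int) (w : Int) (n : Int) (m : Int) (ab_list : List (Int × Int)) (cd_list : List (Int × Int)) : Int :=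
  let res0 : List (List Int) := List.replicate h_.toNat (List.replicate w.toNat 0)
  let room := pvRoom h_ w ab_list cd_list
  -- right
  let res1 := (PySem.List.pyRange 0 h_ 1).foldl (fun res i =>
      ((PySem.List.pyRange 0 w 1).foldl (fun st j => pvUpd room i j st) (res, 0)).1) res0
  -- left
  let res2 := (PySem.List.pyRange 0 h_ 1).foldl (fun res i =>
      ((PySem.List.pyRange (w - 1) (-1) (-1)).foldl (fun st j => pvUpd room i j st) (res, 0)).1) res1
  -- down
  let res3 := (PySem.List.pyRange 0 w 1).foldl (fun res j =>
      ((PySem.List.pyRange 0 h_ 1).foldl (fun st i => pvUpd room i j st) (res, 0)).1) res2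
  -- up
  let res4 := (PySem.List.pyRange 0 w 1).foldl (fun res j =>
      ((PySem.List.pyRange (h_ - 1) (-1) (-1)).foldl (fun st i => pvUpd room i j st) (res, 0)).1) res3
  (PySem.List.pyRange 0 h_ 1).foldl (fun acc i =>
      (PySem.List.pyRange 0 w 1).foldl (fun acc2 j => acc2 + pvGet2 res4 i j) acc) 0

-- ===== PORT B =====
-- one body of seg_lit's loop over (out, pending, has_light)
def pvSegF (p : List Bool × Nat × Bool) (v : Int) : List Bool × Nat × Bool :=
  if v = -1 then (p.1 ++ List.replicate p.2.1 p.2.2 ++ [false], 0, false)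
  else (p.1, p.2.1 + 1, if v = 1 then true else p.2.2)

-- seg_lit: lit flags per cell (out / pending / has_light loop, then final flush)
def pvSegLit (cells : List Int) : List Bool :=
  let st := cells.foldl pvSegF ([], 0, false)
  st.1 ++ List.replicate st.2.1 st.2.2

def solve_alt (h_ : Int) (w : Int) (n : Int) (m : Int) (ab_list : List (Int × Int)) (cd_list : List (Int × Int)) : Int :=
  let room := pvRoom h_ w ab_list cd_list
  let rowsLit := (PySem.List.pyRange 0 h_ 1).map (fun i => pvSegLit (PySem.List.pyGetD room i []))
  let colsLit := (PySem.List.pyRange 0 w 1).map (fun j =>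
      pvSegLit ((PySem.List.pyRange 0 h_ 1).map (fun i => pvGet2 room i j)))
  (PySem.List.pyRange 0 h_ 1).foldl (fun res i =>
      let ri := PySem.List.pyGetD rowsLit i []
      (PySem.List.pyRange 0 w 1).foldl (fun res2 j =>
          if PySem.List.pyGetD ri j false
             || PySem.List.pyGetD (PySem.List.pyGetD colsLit j []) i false
          then res2 + 1 else res2) res) 0

-- ===== PRECONDITION & SPEC =====
-- Pre_ excludes exactly the inputs where A raises IndexError: a light or wall
-- coordinate whose 0-based index falls outside Python's (wraparound) index range
-- of the h × w grid.
def Pre_solve (h_ : Int) (w : Int) (n : Int) (m : Int) (ab_list : List (Int × Int)) (cd_list : List (Int × Int)) : Prop :=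
  (∀ p ∈ ab_list, PySem.Raise.InRange h_.toNat (p.1 - 1) ∧ PySem.Raise.InRange w.toNat (p.2 - 1)) ∧
  (∀ p ∈ cd_list, PySem.Raise.InRange h_.toNat (p.1 - 1) ∧ PySem.Raise.InRange w.toNat (p.2 - 1))
instance (h_ : Int) (w : Int) (n : Int) (m : Int) (ab_list : List (Int × Int)) (cd_list : List (Int × Int)) : Decidable (Pre_solve h_ w n m ab_list cd_list) := by unfold Pre_solve; infer_instance

def pvWitness_solve : Int × Int × Int × Int × (List (Int × Int)) × (List (Int × Int)) :=
  (2, 2, 1, 1, [(1, 1)], [(2, 2)])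

def Spec_solve (h_ : Int) (w : Int) (n : Int) (m : Int) (ab_list : List (Int × Int)) (cd_list : List (Int × Int)) (out : Int) : Prop := out = solve_alt h_ w n m ab_list cd_list
instance (h_ : Int) (w : Int) (n : Int) (m : Int) (ab_list : List (Int × Int)) (cd_list : List (Int × Int)) (out : Int) : Decidable (Spec_solve h_ w n m ab_list cd_list out) := by unfold Spec_solve; infer_instance

-- ===== CLAIM (what is proved, stated in full; the proofs are below) =====
def Claim_equal_solve : Prop := ∀ (h_ : Int) (w : Int) (n : Int) (m : Int) (ab_list : List (Int × Int)) (cd_list : List (Int × Int)), Dom_solve h_ w n m ab_list cd_list → Pre_solve h_ w n m ab_list cd_list → Spec_solve h_ w n m ab_list cd_list (solve h_ w n m ab_list cd_list)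

-- ===== LEMMAS AND PROOFS =====

-- int(b): A stores 0/1 ints, B booleans
def pvB (b : Bool) : Int := if b then 1 else 0

-- entry (i, j) of a grid, Nat indices
def pvE (g : List (List Int)) (i j : Nat) : Int := (g.getD i []).getD j 0

-- a grid with R rows of length C
def pvShape (R C : Nat) (g : List (List Int)) : Prop :=
  g.length = R ∧ ∀ r ∈ g, r.length = C

-- Bool version of A's light update
def pvStep (l : Bool) (v : Int) : Bool := if v = 1 then true else if v = -1 then false else l

-- is there a light before the first wall?
def pvSegHas : List Int → Bool
  | [] => false
  | v :: t => if v = 1 then true else if v = -1 then false else pvSegHas t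

-- light state after processing cells RIGHT to LEFT starting from l
def pvLD (l : Bool) : List Int → Bool
  | [] => l
  | v :: t => pvStep (pvLD l t) v

-- intended per-cell flags of seg_lit, given a light already seen in the open segment
def pvFlags (hl : Bool) : List Int → List Bool
  | [] => []
  | v :: t => (if v = -1 then false else (pvStep hl v || pvSegHas t)) :: pvFlags (pvStep hl v) t

-- seg_lit's loop as structural recursion over (pending, has_light)
def pvSegAux (p : Nat) (hl : Bool) : List Int → List Bool
  | [] => List.replicate p hl
  | v :: t =>
      if v = -1 then List.replicate p hl ++ false :: pvSegAux 0 false t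
      else pvSegAux (p + 1) (if v = 1 then true else hl) t

-- row i of room, first t cells; column j, first t cells
def pvRowL (room : List (List Int)) (i t : Nat) : List Int :=
  (List.range t).map (fun k => pvE room i k)
def pvColL (room : List (List Int)) (j t : Nat) : List Int :=
  (List.range t).map (fun k => pvE room k j)

lemma pvLStep_pvB (b : Bool) (v : Int) : pvLStep (pvB b) v = pvB (pvStep b v) := by
  unfold pvLStep pvStep pvB; split_ifs <;> simp_all

lemma max_pvB (x y : Bool) : max (pvB x) (pvB y) = pvB (x || y) := by
  cases x <;> cases y <;> rfl

lemma max_pvB_zero (x : Bool) : max (pvB x) (0 : Int) = pvB x := by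
  cases x <;> rfl

lemma pvShape_replicate (h_ w : Int) :
    pvShape h_.toNat w.toNat (List.replicate h_.toNat (List.replicate w.toNat (0 : Int))) := by
  constructor
  · simp
  · intro r hr
    simp_all [List.eq_of_mem_replicate hr]

lemma pvIdx_none {nn : Nat} {i : Int} (h : ¬ PySem.Raise.InRange nn i) :
    PySem.List.pyIdx? nn i = none := by
  unfold PySem.List.pyIdx?
  unfold PySem.Raise.InRange at h
  split_ifs with h1 h2 h3
  · exact absurd ⟨by omega, by omega⟩ h
  · rfl
  · exact absurd ⟨by omega, by omega⟩ h
  · rfl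

lemma pvSetD_out {α : Type} {xs : List α} {i : Int} (v : α)
    (h : ¬ PySem.Raise.InRange xs.length i) : PySem.List.pySetD xs i v = xs := by
  unfold PySem.List.pySetD PySem.List.pySet?
  rw [pvIdx_none h]
  rfl

lemma pvMem_pySetD {α : Type} {r v : α} {xs : List α} {i : Int}
    (h : r ∈ PySem.List.pySetD xs i v) : r ∈ xs ∨ r = v := by
  unfold PySem.List.pySetD PySem.List.pySet? at h
  cases hk : PySem.List.pyIdx? xs.length i with
  | none => rw [hk] at h; exact Or.inl h
  | some k =>
      rw [hk] at h
      simp only [Option.map_some, Option.getD_some] at h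
      rcases List.mem_or_eq_of_mem_set h with h' | h'
      · exact Or.inl h'
      · exact Or.inr h'

lemma pvSet2_shape {R C : Nat} {g : List (List Int)} (hs : pvShape R C g) (i j v : Int) :
    pvShape R C (pvSet2 g i j v) := by
  obtain ⟨hlen, hrow⟩ := hs
  unfold pvSet2
  by_cases hin : PySem.Raise.InRange g.length i
  · constructor
    · rw [PySem.List.length_pySetD, hlen]
    · intro r hr
      rcases pvMem_pySetD hr with h | h
      · exact hrow r h
      · subst h
        rw [PySem.List.length_pySetD]
        exact hrow _ (PySem.List.pyGetD_mem g [] hin)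
  · rw [pvSetD_out _ hin]
    exact ⟨hlen, hrow⟩

lemma pvShape_room (h_ w : Int) (ab_list cd_list : List (Int × Int)) :
    pvShape h_.toNat w.toNat (pvRoom h_ w ab_list cd_list) := by
  unfold pvRoom
  have base := pvShape_replicate h_ w
  have step1 : ∀ (l : List (Int × Int)) (g : List (List Int)) (v : Int),
      pvShape h_.toNat w.toNat g →
      pvShape h_.toNat w.toNat (l.foldl (fun g p => pvSet2 g (p.1 - 1) (p.2 - 1) v) g) := by
    intro l
    induction l with
    | nil => intro g v hg; exact hg
    | cons p t ih => intro g v hg; exact ih _ v (pvSet2_shape hg _ _ v)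
  exact step1 _ _ _ (step1 _ _ _ base)

lemma pvGet2_eq {R C : Nat} {g : List (List Int)} (hs : pvShape R C g) {i j : Int}
    (hi0 : 0 ≤ i) (hiR : i < (R : Int)) (hj0 : 0 ≤ j) (hjC : j < (C : Int)) :
    pvGet2 g i j = pvE g i.toNat j.toNat := by
  obtain ⟨hlen, hrow⟩ := hs
  have hiR' : i < (g.length : Int) := by omega
  have hirow : i.toNat < g.length := by omega
  unfold pvGet2 pvE
  rw [PySem.List.pyGetD_eq_getElem g [] hi0 hiR']
  have hC : g[i.toNat].length = C := hrow _ (List.getElem_mem hirow)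
  have hjC' : j < (g[i.toNat].length : Int) := by omega
  have hjrow : j.toNat < g[i.toNat].length := by omega
  rw [PySem.List.pyGetD_eq_getElem _ 0 hj0 hjC', List.getD_eq_getElem g [] hirow,
    List.getD_eq_getElem _ 0 hjrow]

lemma pvE_pvSet2 {R C : Nat} {g : List (List Int)} (hs : pvShape R C g) {i j : Int} (v : Int)
    (hi0 : 0 ≤ i) (hiR : i < (R : Int)) (hj0 : 0 ≤ j) (hjC : j < (C : Int)) (i' j' : Nat) :
    pvE (pvSet2 g i j v) i' j' = if i' = i.toNat ∧ j' = j.toNat then v else pvE g i' j' := by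
  obtain ⟨hlen, hrow⟩ := hs
  have hiR' : i < (g.length : Int) := by omega
  have hirow : i.toNat < g.length := by omega
  have hC : g[i.toNat].length = C := hrow _ (List.getElem_mem hirow)
  have hjrow : j.toNat < g[i.toNat].length := by omega
  unfold pvSet2 pvE
  rw [PySem.List.pySetD_of_nonneg g _ hi0, PySem.List.pyGetD_eq_getElem g [] hi0 hiR',
    PySem.List.pySetD_of_nonneg _ _ hj0]
  by_cases hii : i' = i.toNat
  · rw [List.getD_eq_getElem (l := g.set i.toNat _) (d := []) (by simpa [hii] using hirow)]
    by_cases hjj : j' = j.toNat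
    · rw [if_pos ⟨hii, hjj⟩]
      simp only [hii, List.getElem_set_self]
      rw [List.getD_eq_getElem (l := g[i.toNat].set j.toNat v) (d := 0)
        (by simpa [hjj] using hjrow)]
      simp [hjj]
    · rw [if_neg (by tauto)]
      simp only [hii, List.getElem_set_self]
      rw [List.getD_eq_getElem?_getD, List.getElem?_set_ne (by omega),
        ← List.getD_eq_getElem?_getD, List.getD_eq_getElem g [] hirow]
  · rw [if_neg (by tauto)]
    have hne : (g.set i.toNat (g[i.toNat].set j.toNat v))[i']? = g[i']? :=
      List.getElem?_set_ne (by omega)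
    simp only [List.getD_eq_getElem?_getD, hne]

lemma pyRange_asc_toNat (a : Int) :
    PySem.List.pyRange 0 a 1 = PySem.List.pyRange 0 (a.toNat : Int) 1 := by
  by_cases h : 0 ≤ a
  · rw [Int.toNat_of_nonneg h]
  · rw [PySem.List.pyRange_one_eq_nil (by omega), PySem.List.pyRange_one_eq_nil (by omega)]

lemma pyRange_desc_toNat (a : Int) :
    PySem.List.pyRange (a - 1) (-1) (-1) = PySem.List.pyRange ((a.toNat : Int) - 1) (-1) (-1) := by
  by_cases h : 0 ≤ a
  · rw [Int.toNat_of_nonneg h]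
  · rw [PySem.List.pyRange_neg_one_eq_nil (by omega), PySem.List.pyRange_neg_one_eq_nil (by omega)]

-- seg_lit's fold = pvSegAux
lemma pvSegLit_fold (cells : List Int) : ∀ (out : List Bool) (p : Nat) (hl : Bool),
    (cells.foldl pvSegF (out, p, hl)).1
      ++ List.replicate (cells.foldl pvSegF (out, p, hl)).2.1
          (cells.foldl pvSegF (out, p, hl)).2.2
      = out ++ pvSegAux p hl cells := by
  induction cells with
  | nil => intro out p hl; simp [pvSegAux]
  | cons v t ih =>
      intro out p hl
      simp only [List.foldl_cons]
      by_cases hv : v = -1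
      · subst hv
        rw [show pvSegF (out, p, hl) (-1) =
            (out ++ List.replicate p hl ++ [false], 0, false) from by simp [pvSegF]]
        rw [ih]
        simp [pvSegAux]
      · rw [show pvSegF (out, p, hl) v =
            (out, p + 1, if v = 1 then true else hl) from by simp [pvSegF, hv]]
        rw [ih]
        simp [pvSegAux, hv]

lemma pvSegLit_eq_aux (cells : List Int) : pvSegLit cells = pvSegAux 0 false cells := by
  have h := pvSegLit_fold cells [] 0 false
  simpa [pvSegLit] using h

-- pvSegAux = pending flush ++ per-cell flags
lemma pvSegAux_eq_flags (cells : List Int) : ∀ (p : Nat) (hl : Bool),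
    pvSegAux p hl cells = List.replicate p (hl || pvSegHas cells) ++ pvFlags hl cells := by
  induction cells with
  | nil => intro p hl; simp [pvSegAux, pvSegHas, pvFlags]
  | cons v t ih =>
      intro p hl
      by_cases hm : v = -1
      · simp [pvSegAux, pvSegHas, pvFlags, pvStep, hm, ih]
      · by_cases h1 : v = 1
        · simp [pvSegAux, pvSegHas, pvFlags, pvStep, hm, h1, ih,
            List.replicate_succ', List.append_assoc]
        · simp [pvSegAux, pvSegHas, pvFlags, pvStep, hm, h1, ih,
            List.replicate_succ', List.append_assoc]

-- a cell's flag = light seen from the left || light visible to the right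
lemma pvFlags_getD (cells : List Int) : ∀ (hl : Bool) (j : Nat), j < cells.length →
    (pvFlags hl cells).getD j false
      = ((cells.take (j + 1)).foldl pvStep hl || pvSegHas (cells.drop j)) := by
  induction cells with
  | nil => intro hl j hj; simp at hj
  | cons v t ih =>
      intro hl j hj
      cases j with
      | zero =>
          by_cases h1 : v = 1
          · subst h1; simp [pvFlags, pvStep, pvSegHas]
          · by_cases hm : v = -1
            · subst hm; simp [pvFlags, pvStep, pvSegHas]
            · simp [pvFlags, pvStep, pvSegHas, h1, hm]
      | succ j' =>
          have hj' : j' < t.length := by simpa using hj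
          simp only [pvFlags, List.getD_cons_succ, List.take_succ_cons, List.foldl_cons,
            List.drop_succ_cons]
          exact ih (pvStep hl v) j' hj'

lemma pvLD_false (cells : List Int) : pvLD false cells = pvSegHas cells := by
  induction cells with
  | nil => rfl
  | cons v t ih => simp only [pvLD, pvSegHas, ih, pvStep]

lemma pvLD_append (l : Bool) (xs : List Int) (v : Int) :
    pvLD l (xs ++ [v]) = pvLD (pvStep l v) xs := by
  induction xs with
  | nil => rfl
  | cons x t ih => simp only [List.cons_append, pvLD, ih]

lemma pvRowL_length (room : List (List Int)) (i t : Nat) : (pvRowL room i t).length = t := by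
  simp [pvRowL]

lemma pvRowL_take (room : List (List Int)) (i t t' : Nat) (h : t' ≤ t) :
    (pvRowL room i t).take t' = pvRowL room i t' := by
  unfold pvRowL
  rw [← List.map_take, List.take_range, Nat.min_eq_left h]

lemma pvColL_length (room : List (List Int)) (j t : Nat) : (pvColL room j t).length = t := by
  simp [pvColL]

lemma pvColL_take (room : List (List Int)) (j t t' : Nat) (h : t' ≤ t) :
    (pvColL room j t).take t' = pvColL room j t' := by
  unfold pvColL
  rw [← List.map_take, List.take_range, Nat.min_eq_left h]

lemma pvRowL_succ (room : List (List Int)) (i t : Nat) :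
    pvRowL room i (t + 1) = pvRowL room i t ++ [pvE room i t] := by
  unfold pvRowL
  rw [List.range_succ, List.map_append]
  rfl

lemma pvColL_succ (room : List (List Int)) (j t : Nat) :
    pvColL room j (t + 1) = pvColL room j t ++ [pvE room t j] := by
  unfold pvColL
  rw [List.range_succ, List.map_append]
  rfl

lemma sweepRowAsc (room : List (List Int)) {R C : Nat} (hs : pvShape R C room)
    (i : Int) (hi0 : 0 ≤ i) (hiR : i < (R : Int)) :
    ∀ (tn : Nat), tn ≤ C → ∀ (res : List (List Int)) (l : Int) (lb : Bool),
      l = pvB lb → pvShape R C res →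
      ((PySem.List.pyRange 0 (tn : Int) 1).foldl (fun st j => pvUpd room i j st) (res, l)).2
          = pvB ((pvRowL room i.toNat tn).foldl pvStep lb)
      ∧ pvShape R C ((PySem.List.pyRange 0 (tn : Int) 1).foldl (fun st j => pvUpd room i j st) (res, l)).1
      ∧ ∀ i' j' : Nat, i' < R → j' < C →
          pvE ((PySem.List.pyRange 0 (tn : Int) 1).foldl (fun st j => pvUpd room i j st) (res, l)).1 i' j'
            = if i' = i.toNat ∧ j' < tn
              then max (pvB ((pvRowL room i.toNat (j' + 1)).foldl pvStep lb)) (pvE res i' j')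
              else pvE res i' j' := by
  intro tn
  induction tn with
  | zero =>
      intro _ res l lb hlb hres
      rw [show ((0 : Nat) : Int) = 0 from rfl, PySem.List.pyRange_one_eq_nil (le_refl 0)]
      refine ⟨by simp [pvRowL, hlb], hres, ?_⟩
      intro i' j' _ _
      simp
  | succ tn ih =>
      intro htn res l lb hlb hres
      have h1 : ((tn + 1 : Nat) : Int) = (tn : Int) + 1 := by push_cast; ring
      rw [h1, PySem.List.pyRange_one_succ_right (by omega), List.foldl_append,
        List.foldl_cons, List.foldl_nil]
      obtain ⟨ih2, ihsh, ihE⟩ := ih (by omega) res l lb hlb hres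
      set st := (PySem.List.pyRange 0 (tn : Int) 1).foldl (fun st j => pvUpd room i j st) (res, l) with hst
      have hv : pvGet2 room i (tn : Int) = pvE room i.toNat tn := by
        rw [pvGet2_eq hs hi0 hiR (by omega) (by omega), Int.toNat_natCast]
      have hlight : pvLStep st.2 (pvGet2 room i (tn : Int))
          = pvB ((pvRowL room i.toNat (tn + 1)).foldl pvStep lb) := by
        rw [hv, ih2, pvLStep_pvB, pvRowL_succ, List.foldl_append, List.foldl_cons, List.foldl_nil]
      have hold : pvGet2 st.1 i (tn : Int) = pvE res i.toNat tn := by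
        rw [pvGet2_eq ihsh hi0 hiR (by omega) (by omega), Int.toNat_natCast,
          ihE i.toNat tn (by omega) (by omega)]
        simp
      simp only [pvUpd]
      refine ⟨hlight, pvSet2_shape ihsh _ _ _, ?_⟩
      intro i' j' hi' hj'
      rw [pvE_pvSet2 ihsh _ hi0 hiR (by omega) (by omega), Int.toNat_natCast,
        ihE i' j' hi' hj', hold, hlight]
      by_cases hii : i' = i.toNat
      · subst hii
        by_cases hjj : j' = tn
        · subst hjj
          rw [if_pos ⟨rfl, rfl⟩, if_pos ⟨rfl, by omega⟩]
        · rw [if_neg (by tauto)]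
          by_cases hlt : j' < tn
          · rw [if_pos ⟨rfl, hlt⟩, if_pos ⟨rfl, by omega⟩]
          · rw [if_neg (by tauto), if_neg (by omega)]
      · rw [if_neg (by tauto), if_neg (by tauto), if_neg (by tauto)]

lemma sweepRowDesc (room : List (List Int)) {R C : Nat} (hs : pvShape R C room)
    (i : Int) (hi0 : 0 ≤ i) (hiR : i < (R : Int)) :
    ∀ (an : Nat), an ≤ C → ∀ (res : List (List Int)) (l : Int) (lb : Bool),
      l = pvB lb → pvShape R C res →
      pvShape R C ((PySem.List.pyRange ((an : Int) - 1) (-1) (-1)).foldl (fun st j => pvUpd room i j st) (res, l)).1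
      ∧ ∀ i' j' : Nat, i' < R → j' < C →
          pvE ((PySem.List.pyRange ((an : Int) - 1) (-1) (-1)).foldl (fun st j => pvUpd room i j st) (res, l)).1 i' j'
            = if i' = i.toNat ∧ j' < an
              then max (pvB (pvLD lb ((pvRowL room i.toNat an).drop j'))) (pvE res i' j')
              else pvE res i' j' := by
  intro an
  induction an with
  | zero =>
      intro _ res l lb hlb hres
      rw [show ((0 : Nat) : Int) - 1 = -1 from rfl, PySem.List.pyRange_neg_one_eq_nil (le_refl (-1))]
      refine ⟨hres, ?_⟩
      intro i' j' _ _
      simp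
  | succ an ih =>
      intro han res l lb hlb hres
      have h1 : ((an + 1 : Nat) : Int) - 1 = (an : Int) := by push_cast; ring
      rw [h1, PySem.List.pyRange_neg_one_cons (by omega), List.foldl_cons,
        show pvUpd room i (an : Int) (res, l)
          = (pvSet2 res i (an : Int) (max (pvLStep l (pvGet2 room i (an : Int))) (pvGet2 res i (an : Int))),
             pvLStep l (pvGet2 room i (an : Int))) from rfl]
      have hv : pvGet2 room i (an : Int) = pvE room i.toNat an := by
        rw [pvGet2_eq hs hi0 hiR (by omega) (by omega), Int.toNat_natCast]
      have hold : pvGet2 res i (an : Int) = pvE res i.toNat an := by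
        rw [pvGet2_eq hres hi0 hiR (by omega) (by omega), Int.toNat_natCast]
      have hlb1 : pvLStep l (pvGet2 room i (an : Int))
          = pvB (pvStep lb (pvE room i.toNat an)) := by
        rw [hv, hlb, pvLStep_pvB]
      obtain ⟨ihsh, ihE⟩ := ih (by omega)
        (pvSet2 res i (an : Int) (max (pvLStep l (pvGet2 room i (an : Int))) (pvGet2 res i (an : Int))))
        (pvLStep l (pvGet2 room i (an : Int))) (pvStep lb (pvE room i.toNat an)) hlb1
        (pvSet2_shape hres _ _ _)
      refine ⟨ihsh, ?_⟩
      intro i' j' hi' hj'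
      rw [ihE i' j' hi' hj',
        pvE_pvSet2 hres _ hi0 hiR (by omega) (by omega), Int.toNat_natCast, hold, hlb1]
      have hdrop : ∀ j'' : Nat, j'' ≤ an →
          (pvRowL room i.toNat (an + 1)).drop j''
            = (pvRowL room i.toNat an).drop j'' ++ [pvE room i.toNat an] := by
        intro j'' hj''
        rw [pvRowL_succ, List.drop_append_of_le_length (by rw [pvRowL_length]; omega)]
      by_cases hii : i' = i.toNat
      · subst hii
        by_cases hjj : j' = an
        · subst hjj
          have hnil : (pvRowL room i.toNat j').drop j' = [] :=
            List.drop_eq_nil_of_le (by rw [pvRowL_length])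
          rw [if_neg (by omega), if_pos ⟨rfl, rfl⟩, if_pos ⟨rfl, by omega⟩,
            hdrop j' (le_refl j'), hnil]
          simp [pvLD]
        · by_cases hlt : j' < an
          · rw [if_pos ⟨rfl, hlt⟩, if_neg (by omega), if_pos ⟨rfl, by omega⟩,
              hdrop j' (by omega), pvLD_append]
          · rw [if_neg (by tauto), if_neg (by omega), if_neg (by omega)]
      · rw [if_neg (by tauto), if_neg (by tauto), if_neg (by tauto)]

lemma sweepColAsc (room : List (List Int)) {R C : Nat} (hs : pvShape R C room)
    (j : Int) (hj0 : 0 ≤ j) (hjC : j < (C : Int)) :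
    ∀ (tn : Nat), tn ≤ R → ∀ (res : List (List Int)) (l : Int) (lb : Bool),
      l = pvB lb → pvShape R C res →
      ((PySem.List.pyRange 0 (tn : Int) 1).foldl (fun st i => pvUpd room i j st) (res, l)).2
          = pvB ((pvColL room j.toNat tn).foldl pvStep lb)
      ∧ pvShape R C ((PySem.List.pyRange 0 (tn : Int) 1).foldl (fun st i => pvUpd room i j st) (res, l)).1
      ∧ ∀ i' j' : Nat, i' < R → j' < C →
          pvE ((PySem.List.pyRange 0 (tn : Int) 1).foldl (fun st i => pvUpd room i j st) (res, l)).1 i' j'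
            = if j' = j.toNat ∧ i' < tn
              then max (pvB ((pvColL room j.toNat (i' + 1)).foldl pvStep lb)) (pvE res i' j')
              else pvE res i' j' := by
  intro tn
  induction tn with
  | zero =>
      intro _ res l lb hlb hres
      rw [show ((0 : Nat) : Int) = 0 from rfl, PySem.List.pyRange_one_eq_nil (le_refl 0)]
      refine ⟨by simp [pvColL, hlb], hres, ?_⟩
      intro i' j' _ _
      simp
  | succ tn ih =>
      intro htn res l lb hlb hres
      have h1 : ((tn + 1 : Nat) : Int) = (tn : Int) + 1 := by push_cast; ring
      rw [h1, PySem.List.pyRange_one_succ_right (by omega), List.foldl_append,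
        List.foldl_cons, List.foldl_nil]
      obtain ⟨ih2, ihsh, ihE⟩ := ih (by omega) res l lb hlb hres
      set st := (PySem.List.pyRange 0 (tn : Int) 1).foldl (fun st i => pvUpd room i j st) (res, l) with hst
      have hv : pvGet2 room (tn : Int) j = pvE room tn j.toNat := by
        rw [pvGet2_eq hs (by omega) (by omega) hj0 hjC, Int.toNat_natCast]
      have hlight : pvLStep st.2 (pvGet2 room (tn : Int) j)
          = pvB ((pvColL room j.toNat (tn + 1)).foldl pvStep lb) := by
        rw [hv, ih2, pvLStep_pvB, pvColL_succ, List.foldl_append, List.foldl_cons, List.foldl_nil]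
      have hold : pvGet2 st.1 (tn : Int) j = pvE res tn j.toNat := by
        rw [pvGet2_eq ihsh (by omega) (by omega) hj0 hjC, Int.toNat_natCast,
          ihE tn j.toNat (by omega) (by omega)]
        simp
      simp only [pvUpd]
      refine ⟨hlight, pvSet2_shape ihsh _ _ _, ?_⟩
      intro i' j' hi' hj'
      rw [pvE_pvSet2 ihsh _ (by omega) (by omega) hj0 hjC, Int.toNat_natCast,
        ihE i' j' hi' hj', hold, hlight]
      by_cases hjj : j' = j.toNat
      · subst hjj
        by_cases hii : i' = tn
        · subst hii
          rw [if_pos ⟨rfl, rfl⟩, if_pos ⟨rfl, by omega⟩]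
        · rw [if_neg (by tauto)]
          by_cases hlt : i' < tn
          · rw [if_pos ⟨rfl, hlt⟩, if_pos ⟨rfl, by omega⟩]
          · rw [if_neg (by tauto), if_neg (by omega)]
      · rw [if_neg (by tauto), if_neg (by tauto), if_neg (by tauto)]

lemma sweepColDesc (room : List (List Int)) {R C : Nat} (hs : pvShape R C room)
    (j : Int) (hj0 : 0 ≤ j) (hjC : j < (C : Int)) :
    ∀ (an : Nat), an ≤ R → ∀ (res : List (List Int)) (l : Int) (lb : Bool),
      l = pvB lb → pvShape R C res →
      pvShape R C ((PySem.List.pyRange ((an : Int) - 1) (-1) (-1)).foldl (fun st i => pvUpd room i j st) (res, l)).1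
      ∧ ∀ i' j' : Nat, i' < R → j' < C →
          pvE ((PySem.List.pyRange ((an : Int) - 1) (-1) (-1)).foldl (fun st i => pvUpd room i j st) (res, l)).1 i' j'
            = if j' = j.toNat ∧ i' < an
              then max (pvB (pvLD lb ((pvColL room j.toNat an).drop i'))) (pvE res i' j')
              else pvE res i' j' := by
  intro an
  induction an with
  | zero =>
      intro _ res l lb hlb hres
      rw [show ((0 : Nat) : Int) - 1 = -1 from rfl, PySem.List.pyRange_neg_one_eq_nil (le_refl (-1))]
      refine ⟨hres, ?_⟩
      intro i' j' _ _
      simp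
  | succ an ih =>
      intro han res l lb hlb hres
      have h1 : ((an + 1 : Nat) : Int) - 1 = (an : Int) := by push_cast; ring
      rw [h1, PySem.List.pyRange_neg_one_cons (by omega), List.foldl_cons,
        show pvUpd room (an : Int) j (res, l)
          = (pvSet2 res (an : Int) j (max (pvLStep l (pvGet2 room (an : Int) j)) (pvGet2 res (an : Int) j)),
             pvLStep l (pvGet2 room (an : Int) j)) from rfl]
      have hv : pvGet2 room (an : Int) j = pvE room an j.toNat := by
        rw [pvGet2_eq hs (by omega) (by omega) hj0 hjC, Int.toNat_natCast]
      have hold : pvGet2 res (an : Int) j = pvE res an j.toNat := by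
        rw [pvGet2_eq hres (by omega) (by omega) hj0 hjC, Int.toNat_natCast]
      have hlb1 : pvLStep l (pvGet2 room (an : Int) j)
          = pvB (pvStep lb (pvE room an j.toNat)) := by
        rw [hv, hlb, pvLStep_pvB]
      obtain ⟨ihsh, ihE⟩ := ih (by omega)
        (pvSet2 res (an : Int) j (max (pvLStep l (pvGet2 room (an : Int) j)) (pvGet2 res (an : Int) j)))
        (pvLStep l (pvGet2 room (an : Int) j)) (pvStep lb (pvE room an j.toNat)) hlb1
        (pvSet2_shape hres _ _ _)
      refine ⟨ihsh, ?_⟩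
      intro i' j' hi' hj'
      rw [ihE i' j' hi' hj',
        pvE_pvSet2 hres _ (by omega) (by omega) hj0 hjC, Int.toNat_natCast, hold, hlb1]
      have hdrop : ∀ i'' : Nat, i'' ≤ an →
          (pvColL room j.toNat (an + 1)).drop i''
            = (pvColL room j.toNat an).drop i'' ++ [pvE room an j.toNat] := by
        intro i'' hi''
        rw [pvColL_succ, List.drop_append_of_le_length (by rw [pvColL_length]; omega)]
      by_cases hjj : j' = j.toNat
      · subst hjj
        by_cases hii : i' = an
        · subst hii
          have hnil : (pvColL room j.toNat i').drop i' = [] :=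
            List.drop_eq_nil_of_le (by rw [pvColL_length])
          rw [if_neg (by omega), if_pos ⟨rfl, rfl⟩, if_pos ⟨rfl, by omega⟩,
            hdrop i' (le_refl i'), hnil]
          simp [pvLD]
        · by_cases hlt : i' < an
          · rw [if_pos ⟨rfl, hlt⟩, if_neg (by omega), if_pos ⟨rfl, by omega⟩,
              hdrop i' (by omega), pvLD_append]
          · rw [if_neg (by tauto), if_neg (by omega), if_neg (by omega)]
      · rw [if_neg (by tauto), if_neg (by tauto), if_neg (by tauto)]

lemma outerRight (room : List (List Int)) {R C : Nat} (hs : pvShape R C room) :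
    ∀ (tn : Nat), tn ≤ R → ∀ res, pvShape R C res →
      pvShape R C ((PySem.List.pyRange 0 (tn : Int) 1).foldl (fun res i =>
          ((PySem.List.pyRange 0 (C : Int) 1).foldl (fun st j => pvUpd room i j st) (res, 0)).1) res)
      ∧ ∀ i' j' : Nat, i' < R → j' < C →
          pvE ((PySem.List.pyRange 0 (tn : Int) 1).foldl (fun res i =>
              ((PySem.List.pyRange 0 (C : Int) 1).foldl (fun st j => pvUpd room i j st) (res, 0)).1) res) i' j'
            = if i' < tn
              then max (pvB ((pvRowL room i' (j' + 1)).foldl pvStep false)) (pvE res i' j')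
              else pvE res i' j' := by
  intro tn
  induction tn with
  | zero =>
      intro _ res hres
      rw [show ((0 : Nat) : Int) = 0 from rfl, PySem.List.pyRange_one_eq_nil (le_refl 0)]
      exact ⟨hres, fun i' j' _ _ => by simp⟩
  | succ tn ih =>
      intro htn res hres
      have h1 : ((tn + 1 : Nat) : Int) = (tn : Int) + 1 := by push_cast; ring
      rw [h1, PySem.List.pyRange_one_succ_right (by omega), List.foldl_append,
        List.foldl_cons, List.foldl_nil]
      obtain ⟨ihsh, ihE⟩ := ih (by omega) res hres
      obtain ⟨_, sh2, E2⟩ := sweepRowAsc room hs (tn : Int) (by omega) (by omega)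
        C (le_refl C) _ 0 false rfl ihsh
      refine ⟨sh2, ?_⟩
      intro i' j' hi' hj'
      rw [E2 i' j' hi' hj', Int.toNat_natCast, ihE i' j' hi' hj']
      by_cases hii : i' = tn
      · subst hii
        rw [if_pos ⟨rfl, hj'⟩, if_neg (by omega), if_pos (by omega)]
      · by_cases hlt : i' < tn
        · rw [if_neg (by tauto), if_pos hlt, if_pos (by omega)]
        · rw [if_neg (by tauto), if_neg hlt, if_neg (by omega)]

lemma outerLeft (room : List (List Int)) {R C : Nat} (hs : pvShape R C room) :
    ∀ (tn : Nat), tn ≤ R → ∀ res, pvShape R C res →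
      pvShape R C ((PySem.List.pyRange 0 (tn : Int) 1).foldl (fun res i =>
          ((PySem.List.pyRange ((C : Int) - 1) (-1) (-1)).foldl (fun st j => pvUpd room i j st) (res, 0)).1) res)
      ∧ ∀ i' j' : Nat, i' < R → j' < C →
          pvE ((PySem.List.pyRange 0 (tn : Int) 1).foldl (fun res i =>
              ((PySem.List.pyRange ((C : Int) - 1) (-1) (-1)).foldl (fun st j => pvUpd room i j st) (res, 0)).1) res) i' j'
            = if i' < tn
              then max (pvB (pvSegHas ((pvRowL room i' C).drop j'))) (pvE res i' j')
              else pvE res i' j' := by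
  intro tn
  induction tn with
  | zero =>
      intro _ res hres
      rw [show ((0 : Nat) : Int) = 0 from rfl, PySem.List.pyRange_one_eq_nil (le_refl 0)]
      exact ⟨hres, fun i' j' _ _ => by simp⟩
  | succ tn ih =>
      intro htn res hres
      have h1 : ((tn + 1 : Nat) : Int) = (tn : Int) + 1 := by push_cast; ring
      rw [h1, PySem.List.pyRange_one_succ_right (by omega), List.foldl_append,
        List.foldl_cons, List.foldl_nil]
      obtain ⟨ihsh, ihE⟩ := ih (by omega) res hres
      obtain ⟨sh2, E2⟩ := sweepRowDesc room hs (tn : Int) (by omega) (by omega)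
        C (le_refl C) _ 0 false rfl ihsh
      refine ⟨sh2, ?_⟩
      intro i' j' hi' hj'
      rw [E2 i' j' hi' hj', Int.toNat_natCast, ihE i' j' hi' hj', pvLD_false]
      by_cases hii : i' = tn
      · subst hii
        rw [if_pos ⟨rfl, hj'⟩, if_neg (by omega), if_pos (by omega)]
      · by_cases hlt : i' < tn
        · rw [if_neg (by tauto), if_pos hlt, if_pos (by omega)]
        · rw [if_neg (by tauto), if_neg hlt, if_neg (by omega)]

lemma outerDown (room : List (List Int)) {R C : Nat} (hs : pvShape R C room) :
    ∀ (tn : Nat), tn ≤ C → ∀ res, pvShape R C res →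
      pvShape R C ((PySem.List.pyRange 0 (tn : Int) 1).foldl (fun res j =>
          ((PySem.List.pyRange 0 (R : Int) 1).foldl (fun st i => pvUpd room i j st) (res, 0)).1) res)
      ∧ ∀ i' j' : Nat, i' < R → j' < C →
          pvE ((PySem.List.pyRange 0 (tn : Int) 1).foldl (fun res j =>
              ((PySem.List.pyRange 0 (R : Int) 1).foldl (fun st i => pvUpd room i j st) (res, 0)).1) res) i' j'
            = if j' < tn
              then max (pvB ((pvColL room j' (i' + 1)).foldl pvStep false)) (pvE res i' j')
              else pvE res i' j' := by
  intro tn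
  induction tn with
  | zero =>
      intro _ res hres
      rw [show ((0 : Nat) : Int) = 0 from rfl, PySem.List.pyRange_one_eq_nil (le_refl 0)]
      exact ⟨hres, fun i' j' _ _ => by simp⟩
  | succ tn ih =>
      intro htn res hres
      have h1 : ((tn + 1 : Nat) : Int) = (tn : Int) + 1 := by push_cast; ring
      rw [h1, PySem.List.pyRange_one_succ_right (by omega), List.foldl_append,
        List.foldl_cons, List.foldl_nil]
      obtain ⟨ihsh, ihE⟩ := ih (by omega) res hres
      obtain ⟨_, sh2, E2⟩ := sweepColAsc room hs (tn : Int) (by omega) (by omega)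
        R (le_refl R) _ 0 false rfl ihsh
      refine ⟨sh2, ?_⟩
      intro i' j' hi' hj'
      rw [E2 i' j' hi' hj', Int.toNat_natCast, ihE i' j' hi' hj']
      by_cases hjj : j' = tn
      · subst hjj
        rw [if_pos ⟨rfl, hi'⟩, if_neg (by omega), if_pos (by omega)]
      · by_cases hlt : j' < tn
        · rw [if_neg (by tauto), if_pos hlt, if_pos (by omega)]
        · rw [if_neg (by tauto), if_neg hlt, if_neg (by omega)]

lemma outerUp (room : List (List Int)) {R C : Nat} (hs : pvShape R C room) :
    ∀ (tn : Nat), tn ≤ C → ∀ res, pvShape R C res →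
      pvShape R C ((PySem.List.pyRange 0 (tn : Int) 1).foldl (fun res j =>
          ((PySem.List.pyRange ((R : Int) - 1) (-1) (-1)).foldl (fun st i => pvUpd room i j st) (res, 0)).1) res)
      ∧ ∀ i' j' : Nat, i' < R → j' < C →
          pvE ((PySem.List.pyRange 0 (tn : Int) 1).foldl (fun res j =>
              ((PySem.List.pyRange ((R : Int) - 1) (-1) (-1)).foldl (fun st i => pvUpd room i j st) (res, 0)).1) res) i' j'
            = if j' < tn
              then max (pvB (pvSegHas ((pvColL room j' R).drop i'))) (pvE res i' j')
              else pvE res i' j' := by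
  intro tn
  induction tn with
  | zero =>
      intro _ res hres
      rw [show ((0 : Nat) : Int) = 0 from rfl, PySem.List.pyRange_one_eq_nil (le_refl 0)]
      exact ⟨hres, fun i' j' _ _ => by simp⟩
  | succ tn ih =>
      intro htn res hres
      have h1 : ((tn + 1 : Nat) : Int) = (tn : Int) + 1 := by push_cast; ring
      rw [h1, PySem.List.pyRange_one_succ_right (by omega), List.foldl_append,
        List.foldl_cons, List.foldl_nil]
      obtain ⟨ihsh, ihE⟩ := ih (by omega) res hres
      obtain ⟨sh2, E2⟩ := sweepColDesc room hs (tn : Int) (by omega) (by omega)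
        R (le_refl R) _ 0 false rfl ihsh
      refine ⟨sh2, ?_⟩
      intro i' j' hi' hj'
      rw [E2 i' j' hi' hj', Int.toNat_natCast, ihE i' j' hi' hj', pvLD_false]
      by_cases hjj : j' = tn
      · subst hjj
        rw [if_pos ⟨rfl, hi'⟩, if_neg (by omega), if_pos (by omega)]
      · by_cases hlt : j' < tn
        · rw [if_neg (by tauto), if_pos hlt, if_pos (by omega)]
        · rw [if_neg (by tauto), if_neg hlt, if_neg (by omega)]

lemma pvE_zero (R C : Nat) (i' j' : Nat) (hi' : i' < R) :
    pvE (List.replicate R (List.replicate C (0 : Int))) i' j' = 0 := by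
  unfold pvE
  have h1 : (List.replicate R (List.replicate C (0 : Int))).getD i' [] = List.replicate C (0 : Int) := by
    rw [List.getD_eq_getElem _ _ (by simpa using hi')]
    exact List.getElem_replicate _
  rw [h1]
  cases Nat.lt_or_ge j' C with
  | inl h =>
      rw [List.getD_eq_getElem _ _ (by simpa using h)]
      exact List.getElem_replicate _
  | inr h =>
      rw [List.getD_eq_default _ _ (by simpa using h)]

lemma pvRow_list {R C : Nat} {room : List (List Int)} (hs : pvShape R C room)
    (i' : Nat) (hi' : i' < R) :
    PySem.List.pyGetD room ((i' : Nat) : Int) [] = pvRowL room i' C := by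
  obtain ⟨hlen, hrow⟩ := hs
  have hi2 : i' < room.length := by omega
  rw [PySem.List.pyGetD_natCast, List.getD_eq_getElem room [] hi2]
  have hC : room[i'].length = C := hrow _ (List.getElem_mem hi2)
  apply List.ext_getElem
  · rw [hC, pvRowL_length]
  · intro k hk hk'
    have hkC : k < C := by rwa [pvRowL_length] at hk'
    unfold pvRowL pvE
    simp only [List.getElem_map, List.getElem_range]
    rw [List.getD_eq_getElem room [] hi2, List.getD_eq_getElem _ _ (by omega)]

lemma pvCol_list {R C : Nat} {room : List (List Int)} (hs : pvShape R C room)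
    (j' : Nat) (hj' : j' < C) :
    (PySem.List.pyRange 0 ((R : Nat) : Int) 1).map (fun i => pvGet2 room i ((j' : Nat) : Int))
      = pvColL room j' R := by
  rw [PySem.List.pyRange_zero_natCast R, List.map_map]
  unfold pvColL
  apply List.map_congr_left
  intro k hk
  have hkR : k < R := List.mem_range.mp hk
  simp only [Function.comp_apply]
  rw [pvGet2_eq hs (by omega) (by omega) (by omega) (by omega), Int.toNat_natCast,
    Int.toNat_natCast]

lemma pvSegLit_getD (cells : List Int) (j' : Nat) (hj : j' < cells.length) :
    (pvSegLit cells).getD j' false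
      = ((cells.take (j' + 1)).foldl pvStep false || pvSegHas (cells.drop j')) := by
  rw [pvSegLit_eq_aux, pvSegAux_eq_flags cells 0 false, List.replicate_zero, List.nil_append]
  exact pvFlags_getD cells false j' hj

-- ===== VERDICT (by name: the statement is the Claim_ definition above) =====
theorem solve_spec : Claim_equal_solve := by
  intro h_ w n m ab_list cd_list _ _
  unfold Spec_solve
  simp only [solve, solve_alt]
  rw [pyRange_asc_toNat h_, pyRange_asc_toNat w, pyRange_desc_toNat h_, pyRange_desc_toNat w]
  set room := pvRoom h_ w ab_list cd_list with hroom
  have hs : pvShape h_.toNat w.toNat room := by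
    rw [hroom]; exact pvShape_room h_ w ab_list cd_list
  obtain ⟨sh1, E1⟩ := outerRight room hs h_.toNat (le_refl _)
    (List.replicate h_.toNat (List.replicate w.toNat (0 : Int))) (pvShape_replicate h_ w)
  obtain ⟨sh2, E2⟩ := outerLeft room hs h_.toNat (le_refl _) _ sh1
  obtain ⟨sh3, E3⟩ := outerDown room hs w.toNat (le_refl _) _ sh2
  obtain ⟨sh4, E4⟩ := outerUp room hs w.toNat (le_refl _) _ sh3
  apply PySem.List.foldl_congr_mem
  intro acc i hi
  obtain ⟨hi0, hiR⟩ := PySem.List.mem_pyRange_one.mp hi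
  obtain ⟨i', rfl⟩ := Int.eq_ofNat_of_zero_le hi0
  have hi'R : i' < h_.toNat := by exact_mod_cast hiR
  apply PySem.List.foldl_congr_mem
  intro acc2 j hj
  obtain ⟨hj0, hjC⟩ := PySem.List.mem_pyRange_one.mp hj
  obtain ⟨j', rfl⟩ := Int.eq_ofNat_of_zero_le hj0
  have hj'C : j' < w.toNat := by exact_mod_cast hjC
  -- A side: the cell value of the four composed sweeps
  rw [pvGet2_eq sh4 (by omega) (by exact_mod_cast hiR) (by omega) (by exact_mod_cast hjC),
    Int.toNat_natCast, Int.toNat_natCast,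
    E4 i' j' hi'R hj'C, if_pos hj'C,
    E3 i' j' hi'R hj'C, if_pos hj'C,
    E2 i' j' hi'R hj'C, if_pos hi'R,
    E1 i' j' hi'R hj'C, if_pos hi'R,
    pvE_zero h_.toNat w.toNat i' j' hi'R,
    max_pvB_zero, max_pvB, max_pvB, max_pvB]
  -- B side: the two segment lookups
  rw [PySem.List.pyGetD_map_pyRange_of_nonneg
      (fun i => pvSegLit (PySem.List.pyGetD room i [])) ((h_.toNat : Nat) : Int)
      ((i' : Nat) : Int) [] (by omega) (by exact_mod_cast hiR),
    pvRow_list hs i' hi'R, PySem.List.pyGetD_natCast,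
    pvSegLit_getD _ _ (by rw [pvRowL_length]; exact hj'C),
    pvRowL_take room i' w.toNat (j' + 1) (by omega),
    PySem.List.pyGetD_map_pyRange_of_nonneg
      (fun j => pvSegLit ((PySem.List.pyRange 0 ((h_.toNat : Nat) : Int) 1).map
        (fun i => pvGet2 room i j))) ((w.toNat : Nat) : Int)
      ((j' : Nat) : Int) [] (by omega) (by exact_mod_cast hjC),
    pvCol_list hs j' hj'C, PySem.List.pyGetD_natCast,
    pvSegLit_getD _ _ (by rw [pvColL_length]; exact hi'R),
    pvColL_take room j' h_.toNat (i' + 1) (by omega)]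
  generalize (pvRowL room i' (j' + 1)).foldl pvStep false = a
  generalize pvSegHas ((pvRowL room i' w.toNat).drop j') = b
  generalize (pvColL room j' (i' + 1)).foldl pvStep false = c
  generalize pvSegHas ((pvColL room j' h_.toNat).drop i') = d
  cases a <;> cases b <;> cases c <;> cases d <;> simp [pvB]
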